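-- pv_equiv track=rewrite | github.com/plain-noodle-expert/comp202 | image_processing.py | is_valid_compressed_image
-- ===== SOURCE A (Python) =====
-- def is_valid_compressed_image(comp_image):
--     '''(list<list<str>>) -> bool
--     Takes as input a nested list of compressed image matrix,
--     with each sublist contains only string of form AxB.Returns
--     True if the matrix list is valid, False otherwise.
--     >>> is_valid_compressed_image([['0x3','34x3'],['34x6','10x0']])
--     False
--     >>> is_valid_compressed_image([['0x4','25x4'],['8x3','5x5']])
--     True
--     >>> is_valid_compressed_image([['123x321','345x1'],['255x322']])
--     False
--     '''
--
--     for row in comp_image: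
--         sum_B = 0
--         if type(row) != list:
--             return False
--         for elmt in row:
--             if type(elmt) != str:
--                 return False
--             x_index = elmt.find('x')
--             A = elmt[:x_index]
--             B = elmt[x_index+1:]
--             is_in_correct_form = x_index != -1 and A.isdecimal() and B.isdecimal()
--
--             if not is_in_correct_form or int(A) < 0 or int(A) > 255 or int(B) <= 0:
--                 return False
--
--             sum_B += int(B)
--
--         if row == comp_image[0]:  # the sum of B of the first row
--             prev_sum_B = sum_B
--
--         if prev_sum_B != sum_B:
--             return False
--
--         prev_sum_B = sum_B
--
--     return True
-- ===== SOURCE B (Python) =====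
-- def _parse_cell(cell):
--     '''Single left-to-right scan of the cell: split at the first 'x' while
--     checking every other character is an ASCII digit; returns int(B) for a
--     valid 'AxB' cell, None otherwise.'''
--     seen_x = False
--     a_digits = []
--     b_digits = []
--     for ch in cell:
--         if ch == 'x' and not seen_x:
--             seen_x = True
--         elif '0' <= ch <= '9':
--             (b_digits if seen_x else a_digits).append(ch)
--         else:
--             return None
--     if not (seen_x and a_digits and b_digits):
--         return None
--     a = int(''.join(a_digits))
--     b = int(''.join(b_digits))
--     return b if a <= 255 and 0 < b else None
--
-- def _row_sum(row):
--     total = 0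
--     for cell in row:
--         w = _parse_cell(cell)
--         if w is None:
--             return None
--         total += w
--     return total
--
-- def is_valid_compressed_image(comp_image):
--     if not comp_image:
--         return True
--     first = _row_sum(comp_image[0])
--     if first is None:
--         return False
--     return all(_row_sum(row) == first for row in comp_image[1:])
-- ===== Notes on version B (the rewrite author's own statement) =====
-- stated objective: alternative
-- what changed: B parses each cell with a single character-level scan (a small state machine that splits at the first 'x' while checking every other character is an ASCII digit, collecting the two digit groups) instead of A's find/slice/isdecimal/int probing, and checks consistency by comparing every later row's B-sum against the first row's B-sum with all() instead of A's prev_sum_B accumulator threading with its row==comp_image[0] re-binding.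
import Mathlib
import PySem

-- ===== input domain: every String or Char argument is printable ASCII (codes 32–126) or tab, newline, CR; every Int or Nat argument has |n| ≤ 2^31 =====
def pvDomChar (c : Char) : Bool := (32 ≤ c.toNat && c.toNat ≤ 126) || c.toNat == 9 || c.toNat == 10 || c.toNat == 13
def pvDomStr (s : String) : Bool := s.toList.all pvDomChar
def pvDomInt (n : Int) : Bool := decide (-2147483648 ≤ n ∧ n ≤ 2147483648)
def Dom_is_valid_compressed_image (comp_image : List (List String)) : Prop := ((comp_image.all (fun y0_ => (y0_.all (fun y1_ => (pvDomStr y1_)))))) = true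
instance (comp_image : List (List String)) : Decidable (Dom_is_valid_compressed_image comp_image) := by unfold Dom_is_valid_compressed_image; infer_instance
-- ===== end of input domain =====

-- B replaces A's find/slice/isdecimal cell parsing by a single character-level scan
-- that splits each cell at its first 'x' while validating the characters, and replaces
-- A's prev_sum_B accumulator threading by comparing every later row's B-sum against the
-- first row's B-sum (objective: alternative decomposition, same cost).

-- ===== PORT A =====
-- inner loop of A over a row: returns the accumulated sum_B, none = 'return False'.
-- 'type(elmt) != str' / 'type(row) != list' are statically true here and are omitted.
-- '.isdecimal()' is ported as PySem.Str.strIsdigit: exact on the ASCII domain.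
-- int(A)/int(B) are ported as (PySem.Int.ofStr? _).getD 0: exact since they are only
-- evaluated after isdecimal has succeeded (Python short-circuits the same way).
def aRowLoop : List String → Int → Option Int
  | [], sum_B => some sum_B
  | elmt :: rest, sum_B =>
    let x_index := PySem.Str.find elmt "x"
    let A := PySem.Str.slice elmt none (some x_index)
    let B := PySem.Str.slice elmt (some (x_index + 1)) none
    let is_in_correct_form := (x_index != -1) && PySem.Str.strIsdigit A && PySem.Str.strIsdigit B
    if !is_in_correct_form then none
    else
      let intA := (PySem.Int.ofStr? A).getD 0
      let intB := (PySem.Int.ofStr? B).getD 0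
      if intA < 0 || intA > 255 || intB ≤ 0 then none
      else aRowLoop rest (sum_B + intB)

-- outer loop of A; prev : Option Int models the not-yet-bound prev_sum_B.
def aLoop (first : List String) : List (List String) → Option Int → Bool
  | [], _ => true
  | row :: rest, prev =>
    match aRowLoop row 0 with
    | none => false
    | some sum_B =>
      let prev := if row == first then some sum_B else prev  -- 'if row == comp_image[0]'
      if prev != some sum_B then false
      else aLoop first rest (some sum_B)

def is_valid_compressed_image (comp_image : List (List String)) : Bool :=
  match comp_image with
  | [] => true                                  -- loop body never runs
  | first :: _ => aLoop first comp_image none   -- comp_image[0] = first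

-- ===== PORT B =====
-- the character scan of _parse_cell: state (seen_x, a_digits, b_digits);
-- "'0' <= ch <= '9'" is exactly PySem.Chars.isdigit.
def bScanCell : List Char → Bool → List Char → List Char → Option (List Char × List Char)
  | [], seen_x, a_digits, b_digits =>
    if seen_x && !a_digits.isEmpty && !b_digits.isEmpty then some (a_digits, b_digits) else none
  | ch :: rest, seen_x, a_digits, b_digits =>
    if ch == 'x' && !seen_x then bScanCell rest true a_digits b_digits
    else if PySem.Chars.isdigit ch then
      (if seen_x then bScanCell rest seen_x a_digits (b_digits ++ [ch])
       else bScanCell rest seen_x (a_digits ++ [ch]) b_digits)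
    else none

-- _parse_cell of Source B; int(''.join(...)) is ported as (PySem.Int.ofStr? (String.ofList _)).getD 0:
-- exact since the scan only collects digit characters (a nonempty digit string never raises).
def bParseCell (cell : String) : Option Int :=
  match bScanCell cell.toList false [] [] with
  | none => none
  | some (a_digits, b_digits) =>
    let a := (PySem.Int.ofStr? (String.ofList a_digits)).getD 0
    let b := (PySem.Int.ofStr? (String.ofList b_digits)).getD 0
    if a ≤ 255 && 0 < b then some b else none

-- _row_sum of Source B
def bRowSum : List String → Int → Option Int
  | [], total => some total
  | cell :: rest, total =>
    match bParseCell cell with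
    | none => none
    | some w => bRowSum rest (total + w)

def is_valid_compressed_image_alt (comp_image : List (List String)) : Bool :=
  match comp_image with
  | [] => true
  | first :: rest =>
    match bRowSum first 0 with
    | none => false
    | some s0 => rest.all (fun row => bRowSum row 0 == some s0)   -- all(_row_sum(row) == first ...)

-- ===== PRECONDITION & SPEC =====
def Spec_is_valid_compressed_image (comp_image : List (List String)) (out : Bool) : Prop := out = is_valid_compressed_image_alt comp_image
instance (comp_image : List (List String)) (out : Bool) : Decidable (Spec_is_valid_compressed_image comp_image out) := by unfold Spec_is_valid_compressed_image; infer_instance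

-- ===== CLAIM (what is proved, stated in full; the proofs are below) =====
def Claim_equal_is_valid_compressed_image : Prop := ∀ (comp_image : List (List String)), Dom_is_valid_compressed_image comp_image → Spec_is_valid_compressed_image comp_image (is_valid_compressed_image comp_image)

-- ===== LEMMAS AND PROOFS =====

-- A's per-cell computation, factored out of aRowLoop's step
def aCellVal (elmt : String) : Option Int :=
  let x_index := PySem.Str.find elmt "x"
  let A := PySem.Str.slice elmt none (some x_index)
  let B := PySem.Str.slice elmt (some (x_index + 1)) none
  if (x_index != -1) && PySem.Str.strIsdigit A && PySem.Str.strIsdigit B then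
    let intA := (PySem.Int.ofStr? A).getD 0
    let intB := (PySem.Int.ofStr? B).getD 0
    if intA < 0 || intA > 255 || intB ≤ 0 then none else some intB
  else none

theorem aRowLoop_cons (e : String) (rest : List String) (s : Int) :
    aRowLoop (e :: rest) s =
      match aCellVal e with
      | none => none
      | some w => aRowLoop rest (s + w) := by
  simp only [aRowLoop, aCellVal]
  split_ifs with h1 h2 <;> simp_all

-- scanner: no 'x' at all means rejection (the final seen_x test fails)
theorem bScan_no_x (l : List Char) (as bs : List Char) (h : 'x' ∉ l) :
    bScanCell l false as bs = none := by
  induction l generalizing as bs with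
  | nil => rfl
  | cons c cs ih =>
    have hc : (c == 'x') = false := by
      rw [beq_eq_false_iff_ne]; intro hcx; exact h (hcx ▸ List.mem_cons_self)
    simp only [bScanCell, hc, Bool.false_and, Bool.false_eq_true, if_false]
    split_ifs with hd
    · exact ih _ _ (fun hm => h (List.mem_cons_of_mem _ hm))
    · rfl

-- scanner: before the first 'x', digits are collected into a_digits
theorem bScan_pre (p : List Char) (q : List Char) (as bs : List Char) (h : 'x' ∉ p) :
    bScanCell (p ++ 'x' :: q) false as bs =
      if p.all PySem.Chars.isdigit then bScanCell q true (as ++ p) bs else none := by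
  induction p generalizing as with
  | nil => simp [bScanCell]
  | cons c cs ih =>
    have hc : (c == 'x') = false := by
      rw [beq_eq_false_iff_ne]; intro hcx; exact h (hcx ▸ List.mem_cons_self)
    simp only [List.cons_append, bScanCell, hc, Bool.false_and, Bool.false_eq_true, if_false]
    by_cases hd : PySem.Chars.isdigit c
    · rw [if_pos hd]
      rw [ih _ (fun hm => h (List.mem_cons_of_mem _ hm))]
      simp [hd, List.append_assoc]
    · rw [if_neg hd]
      simp [hd]

-- scanner: after the 'x', digits are collected into b_digits
theorem bScan_post (q : List Char) (as bs : List Char) :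
    bScanCell q true as bs =
      if q.all PySem.Chars.isdigit then
        (if !as.isEmpty && !(bs ++ q).isEmpty then some (as, bs ++ q) else none)
      else none := by
  induction q generalizing bs with
  | nil => simp [bScanCell]
  | cons c cs ih =>
    by_cases hd : PySem.Chars.isdigit c
    · have hc : (c == 'x' && !true) = false := by simp
      simp only [bScanCell, hc, Bool.false_eq_true, if_false, if_pos hd]
      rw [ih (bs ++ [c])]
      simp [hd, List.append_assoc]
    · have hcx : (c == 'x' && !true) = false := by simp
      simp only [bScanCell, hcx, Bool.false_eq_true, if_false, if_neg hd]
      simp [hd]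

-- int('' .join(digits)) is nonnegative: the string has no sign character
theorem bindNat_nonneg (o : Option Nat) :
    0 ≤ (Option.map (fun n => n) (o.bind fun a => pure ((a : Int)))).getD 0 := by
  cases o <;> simp

theorem ofChars_digits_nonneg (cs : List Char) (h : cs.all PySem.Chars.isdigit = true)
    (hne : cs ≠ []) : 0 ≤ (PySem.Int.ofChars? cs).getD 0 := by
  have hsp : ∀ c ∈ cs, PySem.Int.isIntSpace c = false := by
    intro c hc
    have := (List.all_eq_true.mp h) c hc
    simp only [PySem.Chars.isdigit, Bool.and_eq_true, decide_eq_true_eq] at this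
    simp only [PySem.Int.isIntSpace]
    have h1 := this.1; have h2 := this.2
    have : 48 ≤ c.toNat ∧ c.toNat ≤ 57 := by
      constructor <;> simpa [Char.le_def] using ‹_›
    rcases this with ⟨ha, hb⟩
    simp only [Bool.or_eq_false_iff, decide_eq_false_iff_not]
    refine ⟨⟨⟨⟨⟨?_, ?_⟩, ?_⟩, ?_⟩, ?_⟩, ?_⟩ <;>
      (intro he; subst he; simp_all)
  have hdw : ∀ (l : List Char), (∀ c ∈ l, PySem.Int.isIntSpace c = false) →
      List.dropWhile PySem.Int.isIntSpace l = l := by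
    intro l hl
    cases l with
    | nil => rfl
    | cons c cs' => simp [hl c List.mem_cons_self]
  unfold PySem.Int.ofChars?
  rw [hdw cs hsp]
  rw [hdw cs.reverse (by intro c hc; exact hsp c (List.mem_reverse.mp hc))]
  rw [List.reverse_reverse]
  cases cs with
  | nil => exact absurd rfl hne
  | cons c ds =>
    have hcd := (List.all_eq_true.mp h) c List.mem_cons_self
    simp only [PySem.Chars.isdigit, Bool.and_eq_true, decide_eq_true_eq] at hcd
    have hcm : c ≠ '-' := by rintro rfl; exact absurd hcd.1 (by decide)
    have hcp : c ≠ '+' := by rintro rfl; exact absurd hcd.1 (by decide)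
    dsimp only
    split
    · next heq => injection heq with h1 _; exact absurd h1 hcm
    · next heq => injection heq with h1 _; exact absurd h1 hcp
    · exact bindNat_nonneg _

theorem mem_of_infix_singleton {x : Char} {l : List Char} (h : x ∈ l) : [x] <:+: l := by
  obtain ⟨s, t, rfl⟩ := List.append_of_mem h
  exact ⟨s, t, by simp⟩

theorem decompose_at (l : List Char) (n : Nat)
    (hpre : ['x'] <+: l.drop n) : l = l.take n ++ 'x' :: l.drop (n+1) := by
  obtain ⟨t, ht⟩ := hpre
  have hd : l.drop n = 'x' :: t := by simpa using ht.symm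
  have h2 : l.drop (n+1) = t := by
    have h3 : (l.drop n).tail = l.drop (n+1) := List.tail_drop ..
    rw [hd] at h3; simpa using h3.symm
  rw [h2, ← hd, List.take_append_drop]

theorem no_x_take (l : List Char) (n : Nat)
    (hmin : ∀ i < n, ¬ ['x'] <+: l.drop i) : 'x' ∉ l.take n := by
  intro hm
  obtain ⟨j, hj, hget⟩ := List.mem_iff_getElem.mp hm
  have hjn : j < n := lt_of_lt_of_le hj (by simpa using List.length_take_le n l)
  have hjl : j < l.length := by
    have := hj; simp [List.length_take] at this; omega
  apply hmin j hjn
  have h4 : l.drop j = l[j] :: l.drop (j+1) := List.drop_eq_getElem_cons hjl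
  rw [h4]
  have h5 : l[j] = 'x' := by
    rw [← hget]; simp [List.getElem_take]
  rw [h5]
  exact ⟨_, rfl⟩

-- the two bound checks agree for a nonnegative A-value
theorem bounds_eq (a b : Int) (ha : 0 ≤ a) :
    (if a < 0 || a > 255 || b ≤ 0 then (none : Option Int) else some b) =
      (if a ≤ 255 && 0 < b then some b else none) := by
  by_cases h1 : a ≤ 255 <;> by_cases h2 : 0 < b <;>
    simp [h1, h2] <;> omega

-- per-cell: A's find/slice/isdecimal computation equals B's character scan
set_option maxHeartbeats 1000000 in
theorem cell_eq (e : String) : aCellVal e = bParseCell e := by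
  unfold aCellVal bParseCell
  dsimp only
  have hfind : PySem.Str.find e "x" = PySem.Chars.find e.toList ['x'] := by simp [pysem]
  rw [hfind]
  by_cases h : PySem.Chars.find e.toList ['x'] = -1
  · -- no 'x': both reject
    have hnx : 'x' ∉ e.toList := by
      intro hm
      exact ((PySem.Chars.find_eq_neg_one_iff _ _).mp h) (mem_of_infix_singleton hm)
    rw [bScan_no_x _ _ _ hnx]
    simp [h]
  · -- 'x' found at index n
    have hge : 0 ≤ PySem.Chars.find e.toList ['x'] := by
      have := PySem.Chars.neg_one_le_find e.toList ['x']; omega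
    obtain ⟨hpre, hmin⟩ := PySem.Chars.find_spec hge
    set i := PySem.Chars.find e.toList ['x'] with hi
    set n := i.toNat with hn
    have hdec : e.toList = e.toList.take n ++ 'x' :: e.toList.drop (n+1) :=
      decompose_at _ _ hpre
    have hnox : 'x' ∉ e.toList.take n := no_x_take _ _ hmin
    -- B side: scanner = staged conditions
    have hB : bScanCell e.toList false [] [] =
        if (e.toList.take n).all PySem.Chars.isdigit then
          (if (e.toList.drop (n+1)).all PySem.Chars.isdigit then
            (if !(e.toList.take n).isEmpty && !(e.toList.drop (n+1)).isEmpty then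
              some (e.toList.take n, e.toList.drop (n+1)) else none)
           else none)
        else none := by
      conv_lhs => rw [hdec]
      rw [bScan_pre _ _ _ _ hnox]
      by_cases hP : (e.toList.take n).all PySem.Chars.isdigit
      · rw [if_pos hP, if_pos hP, bScan_post]
        simp only [List.nil_append]
      · rw [if_neg hP, if_neg hP]
    rw [hB]
    -- A side: slices are take/drop
    have hA1 : (PySem.Str.slice e none (some i)).toList = e.toList.take n := by
      simp only [pysem]
      exact PySem.List.slice_to _ hge
    have hA2 : (PySem.Str.slice e (some (i+1)) none).toList = e.toList.drop (n+1) := by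
      simp only [pysem]
      rw [PySem.List.slice_from _ (by omega)]
      congr 1
      omega
    have hd1 : PySem.Str.strIsdigit (PySem.Str.slice e none (some i)) =
        (!(e.toList.take n).isEmpty && (e.toList.take n).all PySem.Chars.isdigit) := by
      simp only [pysem]; rw [← hA1]; simp [pysem, PySem.Chars.strIsdigit]
    have hd2 : PySem.Str.strIsdigit (PySem.Str.slice e (some (i+1)) none) =
        (!(e.toList.drop (n+1)).isEmpty && (e.toList.drop (n+1)).all PySem.Chars.isdigit) := by
      simp only [pysem]; rw [← hA2]; simp [pysem, PySem.Chars.strIsdigit]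
    have hv1 : PySem.Int.ofStr? (PySem.Str.slice e none (some i)) =
        PySem.Int.ofStr? (String.ofList (e.toList.take n)) := by
      rw [PySem.Int.ofStr?_ofList, ← hA1]; rfl
    have hv2 : PySem.Int.ofStr? (PySem.Str.slice e (some (i+1)) none) =
        PySem.Int.ofStr? (String.ofList (e.toList.drop (n+1))) := by
      rw [PySem.Int.ofStr?_ofList, ← hA2]; rfl
    have hne : (i != -1) = true := by simp [hi]; omega
    rw [hd1, hd2, hv1, hv2, hne]
    -- now pure boolean bookkeeping on the shared conditions
    by_cases hP : (e.toList.take n).all PySem.Chars.isdigit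
    · by_cases hQ : (e.toList.drop (n+1)).all PySem.Chars.isdigit
      · by_cases hEP : (e.toList.take n).isEmpty
        · simp [hP, hQ, hEP]
        · by_cases hEQ : (e.toList.drop (n+1)).isEmpty
          · simp [hP, hQ, hEP, hEQ]
          · have hnn : 0 ≤ (PySem.Int.ofStr? (String.ofList (e.toList.take n))).getD 0 := by
              rw [PySem.Int.ofStr?_ofList]
              exact ofChars_digits_nonneg _ hP (by simpa [List.isEmpty_iff] using hEP)
            have hEP' : (!(e.toList.take n).isEmpty) = true := by simp [hEP]
            have hEQ' : (!(e.toList.drop (n+1)).isEmpty) = true := by simp [hEQ]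
            simp only [hP, hQ, hEP', hEQ', Bool.and_true, if_true]
            exact bounds_eq _ _ hnn
      · simp [hP, hQ]
    · simp [hP]

-- A's row loop equals B's row sum
theorem row_eq (row : List String) (s : Int) : aRowLoop row s = bRowSum row s := by
  induction row generalizing s with
  | nil => rfl
  | cons e rest ih =>
    rw [aRowLoop_cons, bRowSum, cell_eq]
    cases bParseCell e with
    | none => rfl
    | some w => exact ih (s + w)

-- A's outer loop, once prev_sum_B is bound to the first row's sum S
theorem aLoop_eq (rest : List (List String)) (first : List String) (S : Int)
    (h : aRowLoop first 0 = some S) :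
    aLoop first rest (some S) = decide (∀ r ∈ rest, aRowLoop r 0 = some S) := by
  induction rest with
  | nil => simp [aLoop]
  | cons row rest ih =>
    simp only [aLoop]
    cases hr : aRowLoop row 0 with
    | none => simp [hr]
    | some sB =>
      by_cases hbe : row = first
      · subst hbe
        have hSB : sB = S := by rw [h] at hr; exact (Option.some.inj hr).symm
        subst hSB
        simp [ih, hr]
      · have hbe' : (row == first) = false := by simpa using hbe
        simp only [hbe', if_false, Bool.false_eq_true]
        by_cases hSB : S = sB
        · subst hSB
          simp [ih, hr]
        · have : (some S != some sB) = true := by simpa using hSB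
          simp [this, hr, Ne.symm hSB]

-- ===== VERDICT (by name: the statement is the Claim_ definition above) =====
theorem is_valid_compressed_image_spec : Claim_equal_is_valid_compressed_image := by
  intro ci _
  unfold Spec_is_valid_compressed_image
  cases ci with
  | nil => rfl
  | cons first rest =>
    simp only [is_valid_compressed_image, is_valid_compressed_image_alt, aLoop]
    rw [← row_eq first 0]
    cases hr : aRowLoop first 0 with
    | none => rfl
    | some S =>
      have hself : (first == first) = true := by simp
      have hne : (some S != some S) = false := by simp
      simp only [hself, if_true, hne, Bool.false_eq_true, if_false]
      rw [aLoop_eq rest first S hr]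
      simp only [← row_eq]
      rw [Bool.eq_iff_iff]
      simp [List.all_eq_true]
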